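-- pv_equiv track=rewrite | github.com/nivesh1000/cynoteck-training | code wars/peaks.py | pick_peaks
-- ===== SOURCE A (Python) =====
-- def pick_peaks(arr):
--     peak=[]
--     pos=[]
--     for i in range(1,len(arr)-1):
--         if(arr[i]>arr[i-1] and arr[i]>arr[i+1]):
--             peak.append(arr[i])
--             pos.append(i)
--         elif(arr[i]>arr[i-1] and arr[i]>=arr[i+1]):
--
--             for j in range(i,len(arr)):
--                 if(arr[i]>arr[j]):
--
--                     peak.append(arr[i])
--                     pos.append(i)
--                     break
--                 elif(arr[i]<arr[j]):
--                     break
--                 else: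
--                     continue
--
--     dict={}
--     dict["pos"]=pos
--     dict["peaks"]=peak
--     return dict
-- ===== SOURCE B (Python) =====
-- def pick_peaks(arr):
--     pos = []
--     peaks = []
--     cand = None
--     for i in range(1, len(arr)):
--         if arr[i] > arr[i - 1]:
--             cand = i
--         elif arr[i] < arr[i - 1] and cand is not None:
--             pos.append(cand)
--             peaks.append(arr[cand])
--             cand = None
--     return {"pos": pos, "peaks": peaks}
-- ===== Notes on version B (the rewrite author's own statement) =====
-- stated objective: simpler
-- what changed: Replaced A's nested forward re-scan from each plateau start with a single forward pass that keeps a rising-edge candidate index across plateaus and emits it on the first strict descent.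
import Mathlib
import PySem

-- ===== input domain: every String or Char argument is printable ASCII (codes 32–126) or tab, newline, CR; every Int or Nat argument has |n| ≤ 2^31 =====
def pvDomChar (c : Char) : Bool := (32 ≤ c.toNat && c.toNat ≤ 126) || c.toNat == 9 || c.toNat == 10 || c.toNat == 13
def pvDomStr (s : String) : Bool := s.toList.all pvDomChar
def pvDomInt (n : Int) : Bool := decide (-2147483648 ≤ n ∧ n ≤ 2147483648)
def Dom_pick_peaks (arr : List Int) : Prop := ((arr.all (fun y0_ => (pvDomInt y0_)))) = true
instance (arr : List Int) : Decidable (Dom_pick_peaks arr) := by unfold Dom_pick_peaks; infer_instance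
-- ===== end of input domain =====

-- B replaces A's nested forward re-scan with a single forward pass that keeps a rising-edge
-- candidate index across plateaus and emits it on the first strict descent (objective: simpler).

-- arr[j]; every index either program uses is in range, so the default is never read
def pvA (arr : List Int) (j : Int) : Int := PySem.List.pyGetD arr j 0

-- ===== PORT A =====
-- inner 'for j in range(i, len(arr))' loop of A: true iff it appends (break right after the append)
def pickPeaksInner (arr : List Int) (ai : Int) : List Int → Bool
  | [] => false
  | j :: js =>
    if ai > pvA arr j then true
    else if ai < pvA arr j then false
    else pickPeaksInner arr ai js

-- one iteration of A's outer loop at index i, state = (peak, pos)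
def pvStepA (arr : List Int) (i : Int) (st : List Int × List Int) : List Int × List Int :=
  if pvA arr i > pvA arr (i-1) ∧ pvA arr i > pvA arr (i+1) then
    (st.1 ++ [pvA arr i], st.2 ++ [i])
  else if pvA arr i > pvA arr (i-1) ∧ pvA arr i ≥ pvA arr (i+1) then
    (if pickPeaksInner arr (pvA arr i) (PySem.List.pyRange i (PySem.List.len arr) 1) then
      (st.1 ++ [pvA arr i], st.2 ++ [i])
    else st)
  else st

-- A's outer 'for i in range(1, len(arr)-1)' loop
def pickPeaksLoopA (arr : List Int) : List Int → List Int × List Int → List Int × List Int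
  | [], st => st
  | i :: is, st => pickPeaksLoopA arr is (pvStepA arr i st)

def pick_peaks (arr : List Int) : List (String × List Int) :=
  let st := pickPeaksLoopA arr (PySem.List.pyRange 1 (PySem.List.len arr - 1) 1) ([], [])
  [("pos", st.2), ("peaks", st.1)]

-- ===== PORT B =====
-- one iteration of B's loop at index i, state = (pos, peaks, cand)
def pvStepB (arr : List Int) (i : Int) (st : List Int × List Int × Option Int) :
    List Int × List Int × Option Int :=
  if pvA arr i > pvA arr (i-1) then (st.1, st.2.1, some i)
  else if pvA arr i < pvA arr (i-1) then
    match st.2.2 with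
    | some c => (st.1 ++ [c], st.2.1 ++ [pvA arr c], none)
    | none => (st.1, st.2.1, none)
  else st

-- B's single 'for i in range(1, len(arr))' loop
def pickPeaksLoopB (arr : List Int) :
    List Int → List Int × List Int × Option Int → List Int × List Int × Option Int
  | [], st => st
  | i :: is, st => pickPeaksLoopB arr is (pvStepB arr i st)

def pick_peaks_alt (arr : List Int) : List (String × List Int) :=
  let st := pickPeaksLoopB arr (PySem.List.pyRange 1 (PySem.List.len arr) 1) ([], [], none)
  [("pos", st.1), ("peaks", st.2.1)]

-- ===== PRECONDITION & SPEC =====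
def Spec_pick_peaks (arr : List Int) (out : List (String × List Int)) : Prop := out = pick_peaks_alt arr
instance (arr : List Int) (out : List (String × List Int)) : Decidable (Spec_pick_peaks arr out) := by unfold Spec_pick_peaks; infer_instance

-- ===== CLAIM (what is proved, stated in full; the proofs are below) =====
def Claim_equal_pick_peaks : Prop := ∀ (arr : List Int), Dom_pick_peaks arr → Spec_pick_peaks arr (pick_peaks arr)

-- ===== LEMMAS AND PROOFS =====

-- pending emission decision of A for candidate c once the scan has reached index i
def pvPend (arr : List Int) (c i : Int) : Bool :=
  pickPeaksInner arr (pvA arr c) (PySem.List.pyRange i (PySem.List.len arr) 1)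

-- invariant relating A's accumulator and B's accumulator before processing index i
def pvSR (arr : List Int) (i : Int) (stA : List Int × List Int)
    (stB : List Int × List Int × Option Int) : Prop :=
  match stB.2.2 with
  | none => stA.1 = stB.2.1 ∧ stA.2 = stB.1
  | some c => c < i ∧ (∀ j : Int, c < j → j < i → pvA arr j = pvA arr c) ∧
      stA = (if pvPend arr c i then (stB.2.1 ++ [pvA arr c], stB.1 ++ [c]) else (stB.2.1, stB.1))

theorem pvPend_cons (arr : List Int) (c i : Int) (h : i < (arr.length : Int)) :
    pvPend arr c i =
      (if pvA arr c > pvA arr i then true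
       else if pvA arr c < pvA arr i then false
       else pvPend arr c (i+1)) := by
  unfold pvPend
  rw [PySem.List.pyRange_one_cons (by simpa using h)]
  rfl

theorem pvPend_end (arr : List Int) (c i : Int) (h : (arr.length : Int) ≤ i) :
    pvPend arr c i = false := by
  unfold pvPend
  rw [PySem.List.pyRange_one_eq_nil (by simpa using h)]
  rfl

theorem pvStepA_rise (arr : List Int) (i : Int) (st : List Int × List Int)
    (h1 : pvA arr i > pvA arr (i-1)) (h2 : i + 1 < (arr.length : Int)) :
    pvStepA arr i st = (if pvPend arr i (i+1) then (st.1 ++ [pvA arr i], st.2 ++ [i]) else st) := by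
  have hpc := pvPend_cons arr i (i+1) h2
  rcases lt_trichotomy (pvA arr i) (pvA arr (i+1)) with hlt | heq | hgt
  · have hpend : pvPend arr i (i+1) = false := by
      rw [hpc, if_neg (show ¬ pvA arr i > pvA arr (i+1) by omega),
        if_pos (show pvA arr i < pvA arr (i+1) by omega)]
    unfold pvStepA
    rw [if_neg (show ¬(pvA arr i > pvA arr (i-1) ∧ pvA arr i > pvA arr (i+1)) by omega),
      if_neg (show ¬(pvA arr i > pvA arr (i-1) ∧ pvA arr i ≥ pvA arr (i+1)) by omega), hpend]
    simp
  · have hinner : pickPeaksInner arr (pvA arr i) (PySem.List.pyRange i (PySem.List.len arr) 1)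
        = pvPend arr i (i+1) := by
      have hc := pvPend_cons arr i i (by omega)
      unfold pvPend at hc
      rw [hc, if_neg (show ¬ pvA arr i > pvA arr i by omega),
        if_neg (show ¬ pvA arr i < pvA arr i by omega)]
      rfl
    unfold pvStepA
    rw [if_neg (show ¬(pvA arr i > pvA arr (i-1) ∧ pvA arr i > pvA arr (i+1)) by omega),
      if_pos (show pvA arr i > pvA arr (i-1) ∧ pvA arr i ≥ pvA arr (i+1) from ⟨h1, by omega⟩),
      hinner]
  · have hpend : pvPend arr i (i+1) = true := by
      rw [hpc, if_pos (show pvA arr i > pvA arr (i+1) by omega)]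
    unfold pvStepA
    rw [if_pos (show pvA arr i > pvA arr (i-1) ∧ pvA arr i > pvA arr (i+1) from ⟨h1, hgt⟩), hpend]
    simp

theorem pvStepA_norise (arr : List Int) (i : Int) (st : List Int × List Int)
    (h1 : ¬ pvA arr i > pvA arr (i-1)) : pvStepA arr i st = st := by
  unfold pvStepA
  rw [if_neg (show ¬(pvA arr i > pvA arr (i-1) ∧ pvA arr i > pvA arr (i+1)) by tauto),
    if_neg (show ¬(pvA arr i > pvA arr (i-1) ∧ pvA arr i ≥ pvA arr (i+1)) by tauto)]

-- the plateau hypothesis forces arr[i-1] = arr[c] for a live candidate c < i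
theorem pvPrev_eq (arr : List Int) (c i : Int) (hc : c < i)
    (hp : ∀ j : Int, c < j → j < i → pvA arr j = pvA arr c) :
    pvA arr (i-1) = pvA arr c := by
  rcases eq_or_lt_of_le (by omega : c ≤ i - 1) with h | h
  · rw [← h]
  · exact hp (i-1) h (by omega)

-- one parallel loop step (A and B both process index i) preserves the invariant
theorem pvStep_SR (arr : List Int) (i : Int) (stA : List Int × List Int)
    (stB : List Int × List Int × Option Int) (hiN : i + 1 < (arr.length : Int))
    (hSR : pvSR arr i stA stB) :
    pvSR arr (i+1) (pvStepA arr i stA) (pvStepB arr i stB) := by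
  obtain ⟨pos, peaks, cand⟩ := stB
  obtain ⟨pk, ps⟩ := stA
  rcases cand with _ | c
  · simp only [pvSR] at hSR
    obtain ⟨hA1, hA2⟩ := hSR
    by_cases hr : pvA arr i > pvA arr (i-1)
    · have eB : pvStepB arr i (pos, peaks, none) = (pos, peaks, some i) := by
        unfold pvStepB; rw [if_pos hr]
      rw [eB, pvStepA_rise arr i (pk, ps) hr hiN]
      simp only [pvSR]
      refine ⟨by omega, fun j hj1 hj2 => absurd hj1 (by omega), ?_⟩
      split <;> simp_all
    · have eB : pvStepB arr i (pos, peaks, none) = (pos, peaks, none) := by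
        unfold pvStepB; rw [if_neg hr]; split_ifs <;> rfl
      rw [eB, pvStepA_norise arr i (pk, ps) hr]
      exact ⟨hA1, hA2⟩
  · simp only [pvSR] at hSR
    obtain ⟨hci, hp, hst⟩ := hSR
    have haim := pvPrev_eq arr c i hci hp
    have hpc := pvPend_cons arr c i (by omega)
    rcases lt_trichotomy (pvA arr i) (pvA arr c) with hlt | heq | hgt
    · -- strict descent: B emits the candidate now; A already holds it (pend was true)
      have hpend : pvPend arr c i = true := by
        rw [hpc, if_pos (show pvA arr c > pvA arr i by omega)]
      rw [hpend] at hst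
      rw [if_pos rfl] at hst
      have eB : pvStepB arr i (pos, peaks, some c) = (pos ++ [c], peaks ++ [pvA arr c], none) := by
        unfold pvStepB
        rw [if_neg (show ¬ pvA arr i > pvA arr (i-1) by omega),
          if_pos (show pvA arr i < pvA arr (i-1) by omega)]
      rw [eB, pvStepA_norise arr i (pk, ps) (show ¬ pvA arr i > pvA arr (i-1) by omega), hst]
      exact ⟨rfl, rfl⟩
    · -- plateau continues: candidate survives, pend unchanged
      have hpend : pvPend arr c i = pvPend arr c (i+1) := by
        rw [hpc, if_neg (show ¬ pvA arr c > pvA arr i by omega),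
          if_neg (show ¬ pvA arr c < pvA arr i by omega)]
      have eB : pvStepB arr i (pos, peaks, some c) = (pos, peaks, some c) := by
        unfold pvStepB
        rw [if_neg (show ¬ pvA arr i > pvA arr (i-1) by omega),
          if_neg (show ¬ pvA arr i < pvA arr (i-1) by omega)]
      rw [eB, pvStepA_norise arr i (pk, ps) (show ¬ pvA arr i > pvA arr (i-1) by omega)]
      refine ⟨by omega, fun j hj1 hj2 => ?_, by rw [hst, hpend]⟩
      rcases eq_or_lt_of_le (by omega : j ≤ i) with h | h
      · rw [h, heq]
      · exact hp j hj1 h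
    · -- rising edge: the old candidate dies unemitted (pend was false), i becomes the candidate
      have hpend : pvPend arr c i = false := by
        rw [hpc, if_neg (show ¬ pvA arr c > pvA arr i by omega),
          if_pos (show pvA arr c < pvA arr i by omega)]
      rw [hpend] at hst
      simp only [Bool.false_eq_true, if_false] at hst
      have eB : pvStepB arr i (pos, peaks, some c) = (pos, peaks, some i) := by
        unfold pvStepB; rw [if_pos (show pvA arr i > pvA arr (i-1) by omega)]
      rw [eB, pvStepA_rise arr i (pk, ps) (by omega) hiN]
      simp only [pvSR]
      simp only [Prod.mk.injEq] at hst
      refine ⟨by omega, fun j hj1 hj2 => absurd hj1 (by omega), ?_⟩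
      rw [hst.1, hst.2]

-- B's last iteration (i = len-1), which A's shorter range does not reach, resolves the candidate
theorem pvFinal (arr : List Int) (i : Int) (stA : List Int × List Int)
    (stB : List Int × List Int × Option Int) (hiN : i = (arr.length : Int) - 1)
    (hSR : pvSR arr i stA stB) :
    stA.1 = (pvStepB arr i stB).2.1 ∧ stA.2 = (pvStepB arr i stB).1 := by
  obtain ⟨pos, peaks, cand⟩ := stB
  obtain ⟨pk, ps⟩ := stA
  rcases cand with _ | c
  · simp only [pvSR] at hSR
    unfold pvStepB
    split_ifs <;> simp_all
  · simp only [pvSR] at hSR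
    obtain ⟨hci, hp, hst⟩ := hSR
    have haim := pvPrev_eq arr c i hci hp
    have hpc := pvPend_cons arr c i (by omega)
    rcases lt_trichotomy (pvA arr i) (pvA arr c) with hlt | heq | hgt
    · have hpend : pvPend arr c i = true := by
        rw [hpc, if_pos (show pvA arr c > pvA arr i by omega)]
      rw [hpend] at hst
      rw [if_pos rfl] at hst
      have eB : pvStepB arr i (pos, peaks, some c) = (pos ++ [c], peaks ++ [pvA arr c], none) := by
        unfold pvStepB
        rw [if_neg (show ¬ pvA arr i > pvA arr (i-1) by omega),
          if_pos (show pvA arr i < pvA arr (i-1) by omega)]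
      rw [eB, hst]
      exact ⟨rfl, rfl⟩
    · have hpend : pvPend arr c i = false := by
        rw [hpc, if_neg (show ¬ pvA arr c > pvA arr i by omega),
          if_neg (show ¬ pvA arr c < pvA arr i by omega), pvPend_end arr c (i+1) (by omega)]
      rw [hpend] at hst
      simp only [Bool.false_eq_true, if_false] at hst
      have eB : pvStepB arr i (pos, peaks, some c) = (pos, peaks, some c) := by
        unfold pvStepB
        rw [if_neg (show ¬ pvA arr i > pvA arr (i-1) by omega),
          if_neg (show ¬ pvA arr i < pvA arr (i-1) by omega)]
      rw [eB, hst]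
      exact ⟨rfl, rfl⟩
    · have hpend : pvPend arr c i = false := by
        rw [hpc, if_neg (show ¬ pvA arr c > pvA arr i by omega),
          if_pos (show pvA arr c < pvA arr i by omega)]
      rw [hpend] at hst
      simp only [Bool.false_eq_true, if_false] at hst
      have eB : pvStepB arr i (pos, peaks, some c) = (pos, peaks, some i) := by
        unfold pvStepB; rw [if_pos (show pvA arr i > pvA arr (i-1) by omega)]
      rw [eB, hst]
      exact ⟨rfl, rfl⟩

theorem pvMain (arr : List Int) (k : Nat) :
    ∀ (i : Int) (stA : List Int × List Int) (stB : List Int × List Int × Option Int),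
      1 ≤ i → i + k = (arr.length : Int) - 1 → pvSR arr i stA stB →
      (pickPeaksLoopA arr (PySem.List.pyRange i ((arr.length : Int) - 1) 1) stA).1
        = (pickPeaksLoopB arr (PySem.List.pyRange i (arr.length : Int) 1) stB).2.1 ∧
      (pickPeaksLoopA arr (PySem.List.pyRange i ((arr.length : Int) - 1) 1) stA).2
        = (pickPeaksLoopB arr (PySem.List.pyRange i (arr.length : Int) 1) stB).1 := by
  induction k with
  | zero =>
    intro i stA stB h1 hk hSR
    rw [PySem.List.pyRange_one_eq_nil (by omega), PySem.List.pyRange_one_cons (by omega),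
      PySem.List.pyRange_one_eq_nil (by omega)]
    exact pvFinal arr i stA stB (by omega) hSR
  | succ k ih =>
    intro i stA stB h1 hk hSR
    rw [PySem.List.pyRange_one_cons (show i < (arr.length : Int) - 1 by omega),
      PySem.List.pyRange_one_cons (show i < (arr.length : Int) by omega)]
    exact ih (i+1) _ _ (by omega) (by omega) (pvStep_SR arr i stA stB (by omega) hSR)

theorem pick_peaks_spec₀ : Claim_equal_pick_peaks := by
  intro arr _
  unfold Spec_pick_peaks pick_peaks pick_peaks_alt
  by_cases h2 : 2 ≤ (arr.length : Int)
  · obtain ⟨k, hk⟩ : ∃ k : Nat, (1 : Int) + k = (arr.length : Int) - 1 :=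
      ⟨((arr.length : Int) - 2).toNat, by omega⟩
    have h := pvMain arr k 1 ([], []) ([], [], none) (by omega) hk ⟨rfl, rfl⟩
    simp only [PySem.List.len_eq]
    rw [h.1, h.2]
  · rw [PySem.List.pyRange_one_eq_nil (by simp; omega),
      PySem.List.pyRange_one_eq_nil (by simp; omega)]
    rfl

-- ===== VERDICT (by name: the statement is the Claim_ definition above) =====
theorem pick_peaks_spec : Claim_equal_pick_peaks := pick_peaks_spec₀
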